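-- pv_equiv track=rewrite | github.com/veryfansome/germ | bot/lang/controllers/english.py | extract_label_idx_groups
-- ===== SOURCE A (Python) =====
-- def extract_label_idx_groups(exp, feat, target_labels=None):
--     """
--     For example, given a list of labels (e.g. ["O", "O", "NN", "NN", "O", "O", "NNS", "O"]),
--     this function will extract the index positions of the labels: NN, NNS, NNP, NNPS.
--
--     It returns a list of consecutive index groupings for those noun labels.
--     For example:
--         ["O", "O", "NN", "NN", "O", "O", "NNS", "O"]
--     would return:
--         [[2, 3], [6]]
--
--     Args:
--         exp: Example
--         feat: feature
--         target_labels (set of str): The set of tags to target.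
--
--     Returns:
--         list of lists of int: A list where each sub-list contains consecutive indices
--                               of labels that match NN, NNS, NNP, NNPS.
--     """
--     groups = []
--     current_group = []
--
--     for idx, label in enumerate(exp[feat]):
--         if (label in target_labels) if target_labels is not None else label != "O":
--             # If current_group is empty or the current idx is consecutive (i.e., previous index + 1),
--             # append to current_group. Otherwise, start a new group.
--             if current_group and idx == current_group[-1] + 1:
--                 current_group.append(idx)
--             else:
--                 if current_group:
--                     groups.append(current_group)
--                 current_group = [idx]
--         else:
--             if current_group:
--                 groups.append(current_group)
--                 current_group = []
--
--     # If there's an open group at the end, add it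
--     if current_group:
--         groups.append(current_group)
--
--     return groups
-- ===== SOURCE B (Python) =====
-- def extract_label_idx_groups(exp, feat, target_labels=None):
--     labels = exp[feat]
--     if target_labels is not None:
--         def is_t(lab):
--             return lab in target_labels
--     else:
--         def is_t(lab):
--             return lab != "O"
--     groups = []
--     i, n = 0, len(labels)
--     while i < n:
--         if is_t(labels[i]):
--             j = i + 1
--             while j < n and is_t(labels[j]):
--                 j += 1
--             groups.append(list(range(i, j)))
--             i = j
--         else:
--             i += 1
--     return groups
-- ===== Notes on version B (the rewrite author's own statement) =====
-- stated objective: alternative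
-- what changed: Replaces A's per-index state machine (a current_group buffer with a last-index+1 consecutiveness check and end-of-loop flush) by a two-pointer run scanner that at each target label advances a second pointer to the run's end and emits list(range(i, j)) directly.
import Mathlib
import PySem

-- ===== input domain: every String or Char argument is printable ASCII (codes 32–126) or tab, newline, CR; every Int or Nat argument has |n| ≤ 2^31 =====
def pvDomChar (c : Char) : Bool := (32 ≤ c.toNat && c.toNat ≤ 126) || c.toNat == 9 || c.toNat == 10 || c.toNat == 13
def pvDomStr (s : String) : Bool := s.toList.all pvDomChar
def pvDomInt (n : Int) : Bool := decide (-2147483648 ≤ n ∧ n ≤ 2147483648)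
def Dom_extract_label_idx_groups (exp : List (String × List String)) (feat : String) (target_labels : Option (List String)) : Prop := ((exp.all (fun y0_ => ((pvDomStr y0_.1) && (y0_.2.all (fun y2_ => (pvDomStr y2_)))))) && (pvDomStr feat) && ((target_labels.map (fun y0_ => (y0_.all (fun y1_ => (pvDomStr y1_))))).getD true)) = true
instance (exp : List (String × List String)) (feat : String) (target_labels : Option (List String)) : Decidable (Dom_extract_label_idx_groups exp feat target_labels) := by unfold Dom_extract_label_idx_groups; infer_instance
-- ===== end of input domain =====

-- B replaces A's current_group state machine by a two-pointer run scanner (alternative decomposition, same O(n) cost).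

-- ===== PORT A =====
-- A's for-loop over enumerate(exp[feat]) with state (groups, current_group), transliterated as structural recursion.
def pvALoop (target_labels : Option (List String)) : List (List Int) → List Int → List (Int × String) → List (List Int)
  | groups, cur, [] => if cur.isEmpty then groups else groups ++ [cur]
  | groups, cur, (idx, label) :: rest =>
      if (match target_labels with | some ts => ts.contains label | none => label != "O") then
        if !cur.isEmpty && (idx == cur.getLast! + 1) then
          pvALoop target_labels groups (cur ++ [idx]) rest
        else
          pvALoop target_labels (if cur.isEmpty then groups else groups ++ [cur]) [idx] rest
      else
        if cur.isEmpty then pvALoop target_labels groups cur rest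
        else pvALoop target_labels (groups ++ [cur]) [] rest

def extract_label_idx_groups (exp : List (String × List String)) (feat : String) (target_labels : Option (List String)) : List (List Int) :=
  match exp.lookup feat with
  | none => []   -- exp[feat] raises KeyError: excluded by Pre_
  | some labels => pvALoop target_labels [] [] (PySem.List.enumerate labels 0)

-- ===== PORT B =====
-- B's is_t predicate
def pvIsT (target_labels : Option (List String)) (label : String) : Bool :=
  match target_labels with | some ts => ts.contains label | none => label != "O"

def pvLead (target_labels : Option (List String)) : List String → Nat
  | [] => 0
  | l :: ls => if pvIsT target_labels l then pvLead target_labels ls + 1 else 0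

def pvRuns (target_labels : Option (List String)) : Int → List String → List (List Int)
  | _, [] => []
  | i, l :: ls =>
      if pvIsT target_labels l then
        let c : Nat := pvLead target_labels ls
        PySem.List.pyRange i (i + (c + 1)) 1 :: pvRuns target_labels (i + (c + 1)) (ls.drop c)
      else
        pvRuns target_labels (i + 1) ls
termination_by _ ls => ls.length
decreasing_by
  · simp only [List.length_cons, List.length_drop]; omega
  · simp

def extract_label_idx_groups_alt (exp : List (String × List String)) (feat : String) (target_labels : Option (List String)) : List (List Int) :=
  match exp.lookup feat with
  | none => []   -- exp[feat] raises KeyError: excluded by Pre_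
  | some labels => pvRuns target_labels 0 labels

-- ===== PRECONDITION & SPEC =====
-- Pre_ excludes exactly the inputs where exp[feat] raises KeyError (feat not a key of exp); both A and B raise there.
def Pre_extract_label_idx_groups (exp : List (String × List String)) (feat : String) (target_labels : Option (List String)) : Prop := (exp.lookup feat).isSome = true
instance (exp : List (String × List String)) (feat : String) (target_labels : Option (List String)) : Decidable (Pre_extract_label_idx_groups exp feat target_labels) := by unfold Pre_extract_label_idx_groups; infer_instance

def pvWitness_extract_label_idx_groups : (List (String × List String)) × String × Option (List String) := ([("pos", ["O", "NN", "NN", "O", "NNS"])], "pos", none)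

def Spec_extract_label_idx_groups (exp : List (String × List String)) (feat : String) (target_labels : Option (List String)) (out : List (List Int)) : Prop := out = extract_label_idx_groups_alt exp feat target_labels
instance (exp : List (String × List String)) (feat : String) (target_labels : Option (List String)) (out : List (List Int)) : Decidable (Spec_extract_label_idx_groups exp feat target_labels out) := by unfold Spec_extract_label_idx_groups; infer_instance

-- ===== CLAIM (what is proved, stated in full; the proofs are below) =====
def Claim_equal_extract_label_idx_groups : Prop := ∀ (exp : List (String × List String)) (feat : String) (target_labels : Option (List String)), Dom_extract_label_idx_groups exp feat target_labels → Pre_extract_label_idx_groups exp feat target_labels → Spec_extract_label_idx_groups exp feat target_labels (extract_label_idx_groups exp feat target_labels)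

-- ===== LEMMAS AND PROOFS =====

lemma pvGetLast_pyRange (s i : Int) (h : s < i) : (PySem.List.pyRange s i 1).getLast! = i - 1 := by
  have h2 : i = (i-1) + 1 := by omega
  rw [h2, PySem.List.pyRange_one_succ_right (by omega : s ≤ i - 1)]
  simp

lemma pvNonempty_pyRange (s i : Int) (h : s < i) : (PySem.List.pyRange s i 1).isEmpty = false := by
  simp [List.isEmpty_eq_false_iff, ← List.length_pos_iff, PySem.List.length_pyRange_one]
  omega

lemma pvMain (tl : Option (List String)) (ls : List String) :
    ∀ (i : Int) (groups : List (List Int)),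
      (pvALoop tl groups [] (PySem.List.enumerate ls i) = groups ++ pvRuns tl i ls)
      ∧ ∀ (s : Int), s < i →
          pvALoop tl groups (PySem.List.pyRange s i 1) (PySem.List.enumerate ls i) =
            groups ++ (PySem.List.pyRange s (i + pvLead tl ls) 1
              :: pvRuns tl (i + pvLead tl ls) (ls.drop (pvLead tl ls))) := by
  have hmatch : ∀ lab, (match tl with | some ts => ts.contains lab | none => lab != "O") = pvIsT tl lab := by
    intro lab; cases tl <;> rfl
  induction ls with
  | nil =>
    intro i groups
    refine ⟨by simp [PySem.List.enumerate_nil, pvALoop, pvRuns], ?_⟩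
    intro s hs
    simp [PySem.List.enumerate_nil, pvALoop, pvRuns, pvLead, pvNonempty_pyRange s i hs]
  | cons l ls ih =>
    intro i groups
    by_cases hp : pvIsT tl l = true
    · constructor
      · rw [PySem.List.enumerate_cons]
        show pvALoop tl groups [] ((i, l) :: PySem.List.enumerate ls (i+1)) = _
        simp only [pvALoop, hmatch, hp]
        simp only [if_true, List.isEmpty_nil, Bool.not_true, Bool.false_and]
        rw [show ([i] : List Int) = PySem.List.pyRange i (i+1) 1 from (PySem.List.pyRange_one_singleton i).symm]
        rw [(ih (i+1) groups).2 i (by omega)]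
        simp only [pvRuns, hp, if_true]
        push_cast
        ring_nf
      · intro s hs
        rw [PySem.List.enumerate_cons]
        simp only [pvALoop, hmatch, hp]
        rw [pvNonempty_pyRange s i hs, pvGetLast_pyRange s i hs]
        have : (i == i - 1 + 1) = true := by simp
        rw [this]
        simp only [Bool.not_false, Bool.true_and, if_true]
        rw [← PySem.List.pyRange_one_succ_right (by omega : s ≤ i)]
        rw [(ih (i+1) groups).2 s (by omega)]
        simp only [pvLead, hp, if_true, List.drop_succ_cons]
        congr 3 <;> push_cast <;> ring_nf
    · replace hp : pvIsT tl l = false := by simpa using hp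
      constructor
      · rw [PySem.List.enumerate_cons]
        simp only [pvALoop, hmatch, hp]
        simp only [Bool.false_eq_true, if_false, List.isEmpty_nil, if_true]
        rw [(ih (i+1) groups).1]
        simp [pvRuns, hp]
      · intro s hs
        rw [PySem.List.enumerate_cons]
        simp only [pvALoop, hmatch, hp]
        simp only [Bool.false_eq_true, if_false, pvNonempty_pyRange s i hs]
        rw [(ih (i+1) (groups ++ [PySem.List.pyRange s i 1])).1]
        simp only [pvLead, hp, Bool.false_eq_true, if_false, List.drop_zero]
        simp [pvRuns, hp, List.append_assoc]

-- ===== VERDICT (by name: the statement is the Claim_ definition above) =====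
theorem extract_label_idx_groups_spec : Claim_equal_extract_label_idx_groups := by
  intro exp feat tl _ hpre
  unfold Spec_extract_label_idx_groups extract_label_idx_groups extract_label_idx_groups_alt
  cases h : exp.lookup feat with
  | none => rfl
  | some labels => exact (pvMain tl labels 0 []).1
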